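-- pv_equiv track=rewrite | github.com/argriffing/xgcode | Monospace.py | get_ruler_line
-- ===== SOURCE A (Python) =====
-- def _ruler_helper(label_offset_pairs, max_width, spacing_value):
--     """
--     @param label_offset_pairs: a list of (label_string, offset) pairs
--     @param max_width: the maximum length of the string
--     @param spacing_value: the string used to space the labels
--     @return: a string consisting of spaced labels
--     """
--     arr = []
--     current_width = 0
--     for i, (label, offset) in enumerate(label_offset_pairs):
--         # If writing this label would make the string exceed the maximum allowed width
--         # then we cannot write this label.
--         if offset + len(label) > max_width:
--             continue
--         # calculate the amount of spacing we need
--         spacing_width = offset - current_width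
--         # If there is not sufficient spacing
--         # then we cannot write this label.
--         if i > 0 and spacing_width < 1:
--             continue
--         # add the label to the string
--         s = (spacing_value * spacing_width) + label
--         arr.append(s)
--         current_width += len(s)
--     return ''.join(arr)
--
-- def get_ruler_line(low, high):
--     """
--     Get a string that is a line of numbers.
--     @param low: the integer lower bound of the range
--     @param high: the integer upper bound of the range
--     @return: a string that marks the low number and intervals of ten where possible
--     """
--     if low > high:
--         raise ValueError('the lower bound should not exceed the upper bound')
--     max_width = 1 + high - low
--     label_offset_pairs = []
--     for offset in range(max_width):
--         tick = offset + low
--         if tick == low or tick % 10 == 0: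
--             label_offset_pairs.append((str(tick), offset))
--     spacer = ' '
--     return _ruler_helper(label_offset_pairs, max_width, spacer)
-- ===== SOURCE B (Python) =====
-- def get_ruler_line(low, high):
--     """
--     Get a string that is a line of numbers.
--     @param low: the integer lower bound of the range
--     @param high: the integer upper bound of the range
--     @return: a string that marks the low number and intervals of ten where possible
--     """
--     if low > high:
--         raise ValueError('the lower bound should not exceed the upper bound')
--     max_width = 1 + high - low
--     label = str(low)
--     if len(label) <= max_width:
--         out = [label]
--         last_end = len(label)
--     else:
--         out = []
--         last_end = 0
--     # first multiple of ten strictly greater than low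
--     start = -(-low // 10) * 10
--     if start == low:
--         start += 10
--     for tick in range(start, high + 1, 10):
--         label = str(tick)
--         offset = tick - low
--         if offset + len(label) <= max_width and last_end < offset:
--             out.append(' ' * (offset - last_end))
--             out.append(label)
--             last_end = offset + len(label)
--     return ''.join(out)
-- ===== Notes on version B (the rewrite author's own statement) =====
-- stated objective: alternative
-- what changed: B drops A's two-phase design (scan every offset to build a label/offset pair list, then a generic spacing helper over enumerated pairs): it emits the low label directly and then steps arithmetically from one multiple of ten to the next, inlining the width/gap rules in a single accumulator loop.
import Mathlib
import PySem

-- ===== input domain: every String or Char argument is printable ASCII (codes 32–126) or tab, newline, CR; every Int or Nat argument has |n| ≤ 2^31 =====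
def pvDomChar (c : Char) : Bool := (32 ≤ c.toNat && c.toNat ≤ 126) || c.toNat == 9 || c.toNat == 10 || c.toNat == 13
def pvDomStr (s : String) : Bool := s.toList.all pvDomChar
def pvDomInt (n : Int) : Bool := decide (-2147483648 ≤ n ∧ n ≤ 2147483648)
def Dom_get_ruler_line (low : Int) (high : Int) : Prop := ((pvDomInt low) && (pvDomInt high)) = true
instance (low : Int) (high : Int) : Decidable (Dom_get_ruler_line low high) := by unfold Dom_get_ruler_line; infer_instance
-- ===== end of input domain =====

-- B replaces A's scan over every offset plus the two-phase pair-list/helper machinery by a single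
-- loop that steps directly from one multiple of ten to the next (objective: alternative/simpler).
-- Equivalence is about the RETURN value; on low > high the Python raises ValueError (excluded by Pre_).

-- ===== PORT A =====
-- literal port of _ruler_helper (strings as List Char; ''.join via PySem.Chars.join)
def rulerHelper (label_offset_pairs : List (List Char × Int)) (max_width : Int)
    (spacing_value : List Char) : List Char :=
  let res := (PySem.List.enumerate label_offset_pairs 0).foldl
    (fun (st : List (List Char) × Int) ip =>
      -- ip = (i, (label, offset)); st = (arr, current_width)
      if ip.2.2 + (ip.2.1.length : Int) > max_width then st
      else
        let spacing_width := ip.2.2 - st.2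
        if ip.1 > 0 ∧ spacing_width < 1 then st
        else
          let s := PySem.List.pyRepeat spacing_value spacing_width ++ ip.2.1
          (st.1 ++ [s], st.2 + (s.length : Int)))
    ([], 0)
  PySem.Chars.join [] res.1

def get_ruler_line (low : Int) (high : Int) : String :=
  if low > high then ""  -- Python raises ValueError here; excluded by Pre_
  else
    let max_width := 1 + high - low
    let label_offset_pairs := (PySem.List.pyRange 0 max_width 1).foldl
      (fun ps offset =>
        let tick := offset + low
        if tick = low ∨ PySem.Int.mod tick 10 = 0 then
          ps ++ [(PySem.Int.toChars tick, offset)]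
        else ps) []
    String.ofList (rulerHelper label_offset_pairs max_width [' '])

-- ===== PORT B =====
def get_ruler_line_alt (low : Int) (high : Int) : String :=
  if low > high then ""  -- Python raises ValueError here; excluded by Pre_
  else
    let max_width := 1 + high - low
    let label := PySem.Int.toChars low
    let init : List (List Char) × Int :=
      if (label.length : Int) ≤ max_width then ([label], (label.length : Int)) else ([], 0)
    -- first multiple of ten strictly greater than low
    let start0 := -(PySem.Int.floordiv (-low) 10) * 10
    let start := if start0 = low then start0 + 10 else start0
    let res := (PySem.List.pyRange start (high + 1) 10).foldl
      (fun (st : List (List Char) × Int) tick =>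
        let lab := PySem.Int.toChars tick
        let offset := tick - low
        if offset + (lab.length : Int) ≤ max_width ∧ st.2 < offset then
          (st.1 ++ [PySem.List.pyRepeat [' '] (offset - st.2), lab],
           offset + (lab.length : Int))
        else st) init
    String.ofList (PySem.Chars.join [] res.1)

-- ===== PRECONDITION & SPEC =====
-- Pre_ excludes exactly the inputs low > high, on which the Python A raises ValueError.
def Pre_get_ruler_line (low : Int) (high : Int) : Prop := low ≤ high
instance (low : Int) (high : Int) : Decidable (Pre_get_ruler_line low high) := by
  unfold Pre_get_ruler_line; infer_instance

def pvWitness_get_ruler_line : Int × Int := (-3, 42)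

def Spec_get_ruler_line (low : Int) (high : Int) (out : String) : Prop := out = get_ruler_line_alt low high
instance (low : Int) (high : Int) (out : String) : Decidable (Spec_get_ruler_line low high out) := by
  unfold Spec_get_ruler_line; infer_instance

-- ===== CLAIM (what is proved, stated in full; the proofs are below) =====
def Claim_equal_get_ruler_line : Prop := ∀ (low : Int) (high : Int), Dom_get_ruler_line low high → Pre_get_ruler_line low high → Spec_get_ruler_line low high (get_ruler_line low high)

-- ===== LEMMAS AND PROOFS =====

-- ''.join over List Char is flatten
lemma join_empty_sep (parts : List (List Char)) :
    PySem.Chars.join [] parts = parts.flatten := by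
  induction parts with
  | nil => simp [PySem.Chars.join, List.intercalate]
  | cons x xs ih =>
    cases xs with
    | nil => simp [PySem.Chars.join, List.intercalate]
    | cons y ys =>
      simp only [PySem.Chars.join, List.intercalate, List.intersperse] at *
      simp at *
      simp [ih]

-- one step on the right end of a step-10 range
lemma pyRange10_succ (a b : Int) :
    PySem.List.pyRange a (b + 1) 10 =
      PySem.List.pyRange a b 10 ++ (if a ≤ b ∧ (10 : Int) ∣ b - a then [b] else []) := by
  rw [PySem.List.pyRange_of_pos a (b+1) (by norm_num),
      PySem.List.pyRange_of_pos a b (by norm_num)]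
  by_cases h : a ≤ b ∧ (10 : Int) ∣ b - a
  · obtain ⟨hab, m, hm⟩ := h
    have hm0 : 0 ≤ m := by omega
    have hc1 : ((b + 1 - a + 10 - 1) / 10).toNat = m.toNat + 1 := by omega
    have hc0 : (if a < b then ((b - a + 10 - 1) / 10).toNat else 0) = m.toNat := by
      split_ifs with h' <;> omega
    rw [if_pos (by omega), hc1, hc0, if_pos ⟨hab, ⟨m, hm⟩⟩, List.range_succ]
    simp
    omega
  · rw [if_neg h]
    by_cases hab : a ≤ b
    · have hnd : ¬ (10 : Int) ∣ b - a := fun hd => h ⟨hab, hd⟩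
      have hab' : a < b := by
        rcases eq_or_lt_of_le hab with rfl | h' <;> simp_all
      rw [if_pos (by omega), if_pos hab']
      have : (b + 1 - a + 10 - 1) / 10 = (b - a + 10 - 1) / 10 := by omega
      rw [this]
      simp
    · rw [if_neg (by omega), if_neg (by omega)]
      simp

lemma pyRange10_nil (a b : Int) (h : b ≤ a) : PySem.List.pyRange a b 10 = [] := by
  rw [PySem.List.pyRange_of_pos a b (by norm_num), if_neg (by omega)]
  simp

-- the offsets in [1, n) whose tick is a multiple of ten, as offsets of the step-10 tick range
lemma tens_range (low start : Int) (hs1 : low < start) (hs2 : start ≤ low + 10)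
    (hs3 : (10 : Int) ∣ start) : ∀ (n : Nat),
    (PySem.List.pyRange 1 (n : Int) 1).filter
        (fun o => decide (PySem.Int.mod (o + low) 10 = 0)) =
      (PySem.List.pyRange start (low + (n : Int)) 10).map (fun t => t - low) := by
  intro n
  induction n with
  | zero =>
    rw [PySem.List.pyRange_one_eq_nil (by norm_num), pyRange10_nil _ _ (by omega)]
    simp
  | succ n ih =>
    cases Nat.eq_zero_or_pos n with
    | inl h0 =>
      subst h0
      have h1 : ((0 + 1 : Nat) : Int) = 1 := by norm_num
      rw [h1, PySem.List.pyRange_one_eq_nil (by norm_num), pyRange10_nil _ _ (by omega)]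
      simp
    | inr hpos =>
      have hcast : ((n + 1 : Nat) : Int) = (n : Int) + 1 := by push_cast; ring
      rw [hcast, PySem.List.pyRange_one_succ_right (by exact_mod_cast hpos),
          List.filter_append, ih, show low + ((n : Int) + 1) = (low + (n : Int)) + 1 by ring,
          pyRange10_succ, List.map_append]
      congr 1
      by_cases hd : (10 : Int) ∣ ((n : Int) + low)
      · have hmem : start ≤ low + (n : Int) := by
          rcases hs3 with ⟨k, hk⟩; rcases hd with ⟨j, hj⟩; omega
        have hd2 : (10 : Int) ∣ low + (n : Int) - start := by
          rcases hs3 with ⟨k, hk⟩; rcases hd with ⟨j, hj⟩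
          exact ⟨j - k, by omega⟩
        rw [if_pos ⟨hmem, hd2⟩]
        simp [PySem.Int.mod_eq_zero_iff_dvd, hd]
      · have : ¬ ((10 : Int) ∣ low + (n : Int) - start) := by
          intro hc; exact hd (by rcases hs3 with ⟨k, hk⟩; rcases hc with ⟨j, hj⟩; exact ⟨j + k, by omega⟩)
        rw [if_neg (by tauto)]
        simp [add_comm]
        intro hc
        exact absurd (by omega : (10:Int) ∣ (n : Int) + low) hd

-- proof-side names for the two loop bodies (definitionally the ports' lambdas)
def stepA (max_width : Int) (st : List (List Char) × Int)
    (ip : Int × (List Char × Int)) : List (List Char) × Int :=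
  if ip.2.2 + (ip.2.1.length : Int) > max_width then st
  else
    let spacing_width := ip.2.2 - st.2
    if ip.1 > 0 ∧ spacing_width < 1 then st
    else
      let s := PySem.List.pyRepeat [' '] spacing_width ++ ip.2.1
      (st.1 ++ [s], st.2 + (s.length : Int))

def stepB (low max_width : Int) (st : List (List Char) × Int)
    (tick : Int) : List (List Char) × Int :=
  let lab := PySem.Int.toChars tick
  let offset := tick - low
  if offset + (lab.length : Int) ≤ max_width ∧ st.2 < offset then
    (st.1 ++ [PySem.List.pyRepeat [' '] (offset - st.2), lab],
     offset + (lab.length : Int))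
  else st

-- the two write-loops agree (A over indexed pairs with index ≥ 1, B over the tick list),
-- given equal current width and equal flattened output
lemma loop_align (low max_width : Int) (ts : List Int) :
    ∀ (k : Int), 1 ≤ k → ∀ (arrA outB : List (List Char)) (cur : Int),
    arrA.flatten = outB.flatten →
    ((PySem.List.enumerate (ts.map (fun t => (PySem.Int.toChars t, t - low))) k).foldl
        (stepA max_width) (arrA, cur)).1.flatten
      = (ts.foldl (stepB low max_width) (outB, cur)).1.flatten
    ∧ ((PySem.List.enumerate (ts.map (fun t => (PySem.Int.toChars t, t - low))) k).foldl
        (stepA max_width) (arrA, cur)).2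
      = (ts.foldl (stepB low max_width) (outB, cur)).2 := by
  induction ts with
  | nil => intro k hk arrA outB cur h; exact ⟨h, rfl⟩
  | cons t ts ih =>
    intro k hk arrA outB cur h
    simp only [List.map_cons, PySem.List.enumerate_cons, List.foldl_cons]
    by_cases hw : (t - low) + ((PySem.Int.toChars t).length : Int) > max_width
    · rw [show stepA max_width (arrA, cur) (k, PySem.Int.toChars t, t - low) = (arrA, cur) from
        by simp [stepA, if_pos hw],
        show stepB low max_width (outB, cur) t = (outB, cur) from
        by simp only [stepB]; rw [if_neg (by omega)]]
      exact ih (k + 1) (by omega) arrA outB cur h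
    · by_cases hg : cur < t - low
      · rw [show stepA max_width (arrA, cur) (k, PySem.Int.toChars t, t - low)
            = (arrA ++ [PySem.List.pyRepeat [' '] (t - low - cur) ++ PySem.Int.toChars t],
               cur + ((PySem.List.pyRepeat [' '] (t - low - cur) ++ PySem.Int.toChars t).length : Int))
            from by simp only [stepA]; rw [if_neg (by omega), if_neg (by simp; omega)],
          show stepB low max_width (outB, cur) t
            = (outB ++ [PySem.List.pyRepeat [' '] (t - low - cur), PySem.Int.toChars t],
               (t - low) + ((PySem.Int.toChars t).length : Int))
            from by simp only [stepB]; rw [if_pos (by constructor <;> omega)]]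
        have hlen : ((PySem.List.pyRepeat [' '] (t - low - cur)).length : Int)
            = t - low - cur := by
          rw [PySem.List.pyRepeat_singleton, List.length_replicate]; omega
        have hcur : cur + ((PySem.List.pyRepeat [' '] (t - low - cur)
            ++ PySem.Int.toChars t).length : Int) = (t - low) + ((PySem.Int.toChars t).length : Int) := by
          rw [List.length_append]; push_cast at hlen ⊢; omega
        rw [hcur]
        apply ih (k + 1) (by omega)
        simp [h]
      · rw [show stepA max_width (arrA, cur) (k, PySem.Int.toChars t, t - low) = (arrA, cur) from
          by simp only [stepA]; rw [if_neg (by omega), if_pos (by constructor <;> omega)],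
          show stepB low max_width (outB, cur) t = (outB, cur) from
          by simp only [stepB]; rw [if_neg (by simp; omega)]]
        exact ih (k + 1) (by omega) arrA outB cur h

-- the two sides, with the loop bodies named
lemma A_eq (low high : Int) (h : low ≤ high) :
    get_ruler_line low high = String.ofList (PySem.Chars.join []
      ((PySem.List.enumerate ((PySem.List.pyRange 0 (1 + high - low) 1).foldl
          (fun ps offset =>
            let tick := offset + low
            if tick = low ∨ PySem.Int.mod tick 10 = 0 then
              ps ++ [(PySem.Int.toChars tick, offset)]
            else ps) []) 0).foldl
        (stepA (1 + high - low)) ([], 0)).1) := by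
  unfold get_ruler_line rulerHelper
  rw [if_neg (by omega)]
  rfl

lemma B_eq (low high : Int) (h : low ≤ high) :
    get_ruler_line_alt low high = String.ofList (PySem.Chars.join []
      ((PySem.List.pyRange
          ((if -(PySem.Int.floordiv (-low) 10) * 10 = low
            then -(PySem.Int.floordiv (-low) 10) * 10 + 10
            else -(PySem.Int.floordiv (-low) 10) * 10)) (high + 1) 10).foldl
        (stepB low (1 + high - low))
        (if ((PySem.Int.toChars low).length : Int) ≤ 1 + high - low
         then ([PySem.Int.toChars low], ((PySem.Int.toChars low).length : Int))
         else ([], 0))).1) := by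
  unfold get_ruler_line_alt
  rw [if_neg (by omega)]
  rfl

-- A's pair-building pass, as the head pair followed by the mapped tick range
lemma pairs_eq (low high start : Int) (h : low ≤ high) (hs1 : low < start)
    (hs2 : start ≤ low + 10) (hs3 : (10 : Int) ∣ start) :
    (PySem.List.pyRange 0 (1 + high - low) 1).foldl
      (fun ps offset =>
        let tick := offset + low
        if tick = low ∨ PySem.Int.mod tick 10 = 0 then
          ps ++ [(PySem.Int.toChars tick, offset)]
        else ps) []
    = (PySem.Int.toChars low, 0) ::
        (PySem.List.pyRange start (high + 1) 10).map
          (fun t => (PySem.Int.toChars t, t - low)) := by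
  have hbody : (fun (ps : List (List Char × Int)) (offset : Int) =>
      let tick := offset + low
      if tick = low ∨ PySem.Int.mod tick 10 = 0 then
        ps ++ [(PySem.Int.toChars tick, offset)]
      else ps)
      = (fun ps offset =>
        if (fun o => decide (o + low = low ∨ PySem.Int.mod (o + low) 10 = 0)) offset = true then
          ps ++ [(fun o => (PySem.Int.toChars (o + low), o)) offset]
        else ps) := by
    funext ps o
    by_cases hp : o + low = low ∨ PySem.Int.mod (o + low) 10 = 0
    · simp [hp]
    · simp [hp]
  rw [hbody, PySem.List.foldl_append_if, List.nil_append,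
      PySem.List.pyRange_one_cons (by omega : (0 : Int) < 1 + high - low)]
  rw [List.filter_cons_of_pos (by simp)]
  have hcong : List.filter (fun o => decide (o + low = low ∨ PySem.Int.mod (o + low) 10 = 0))
      (PySem.List.pyRange (0 + 1) (1 + high - low) 1)
      = List.filter (fun o => decide (PySem.Int.mod (o + low) 10 = 0))
        (PySem.List.pyRange 1 (1 + high - low) 1) := by
    rw [show (0 : Int) + 1 = 1 by norm_num]
    apply List.filter_congr
    intro o ho
    have := (PySem.List.mem_pyRange_one.mp ho).1
    simp only [decide_eq_decide]
    constructor
    · rintro (hc | hc)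
      · omega
      · exact hc
    · exact Or.inr
  rw [hcong]
  have hn : (1 + high - low) = ((1 + high - low).toNat : Int) := by omega
  rw [hn, tens_range low start hs1 hs2 hs3 (1 + high - low).toNat,
      show low + ((1 + high - low).toNat : Int) = high + 1 by omega]
  simp [List.map_map, Function.comp]

-- ===== VERDICT (by name: the statement is the Claim_ definition above) =====
theorem get_ruler_line_spec : Claim_equal_get_ruler_line := by
  intro low high _ hpre
  have hle : low ≤ high := hpre
  unfold Spec_get_ruler_line
  rw [A_eq low high hle, B_eq low high hle]
  -- facts about the first multiple of ten strictly greater than low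
  have hfd := PySem.Int.floordiv_mul_add_mod (-low) 10
  have hm1 := PySem.Int.mod_nonneg (-low) (show (0:Int) < 10 by norm_num)
  have hm2 := PySem.Int.mod_lt (-low) (show (0:Int) < 10 by norm_num)
  set q := PySem.Int.floordiv (-low) 10 with hq
  set start := (if -q * 10 = low then -q * 10 + 10 else -q * 10) with hst
  have hs1 : low < start := by rw [hst]; split_ifs with h0 <;> omega
  have hs2 : start ≤ low + 10 := by rw [hst]; split_ifs with h0 <;> omega
  have hs3 : (10 : Int) ∣ start := by
    rw [hst]; split_ifs with h0
    · exact ⟨-q + 1, by ring⟩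
    · exact ⟨-q, by ring⟩
  rw [pairs_eq low high start hle hs1 hs2 hs3]
  rw [PySem.List.enumerate_cons, List.foldl_cons]
  have hstep0 : stepA (1 + high - low) ([], 0) (0, PySem.Int.toChars low, 0)
      = (if ((PySem.Int.toChars low).length : Int) ≤ 1 + high - low
         then ([PySem.Int.toChars low], ((PySem.Int.toChars low).length : Int))
         else ([], 0)) := by
    by_cases hL : ((PySem.Int.toChars low).length : Int) ≤ 1 + high - low
    · rw [if_pos hL]
      simp only [stepA]
      rw [if_neg (by simpa using hL), if_neg (by simp)]
      simp [PySem.List.pyRepeat_singleton]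
    · rw [if_neg hL]
      simp only [stepA]
      rw [if_pos (by simpa using not_le.mp hL)]
  rw [hstep0]
  have := loop_align low (1 + high - low) (PySem.List.pyRange start (high + 1) 10) 1 (by norm_num)
    (if ((PySem.Int.toChars low).length : Int) ≤ 1 + high - low
     then [PySem.Int.toChars low] else ([] : List (List Char)))
    (if ((PySem.Int.toChars low).length : Int) ≤ 1 + high - low
     then [PySem.Int.toChars low] else ([] : List (List Char)))
    (if ((PySem.Int.toChars low).length : Int) ≤ 1 + high - low
     then ((PySem.Int.toChars low).length : Int) else 0) rfl
  rw [join_empty_sep, join_empty_sep]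
  congr 1
  by_cases hL : ((PySem.Int.toChars low).length : Int) ≤ 1 + high - low
  · rw [if_pos hL]
    simpa [hL] using this.1
  · rw [if_neg hL]
    simpa [hL] using this.1
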